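-- pv_equiv track=rewrite | github.com/CNuge/snp_genome_placement | CigarParse.py | adjust_bp
-- ===== SOURCE A (Python) =====
-- def adjust_bp(bp_of_snp, cigar_dat):
-- 	""" scan the cigar data, making front trims, insertions, and deletions"""
-- 	change_to_bp = 0
-- 	bp_scan = 0
-- 	for x, cigar_bit in enumerate(cigar_dat):
-- 		if cigar_bit[1] == 'M':
-- 			""" count the matches towards the scan, no change to location"""
-- 			bp_scan += cigar_bit[0]
--
-- 		elif cigar_bit[1] == 'D':
-- 			"""minus one from location, move bp scan count up"""
-- 			change_to_bp -= cigar_bit[0]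
-- 			bp_scan += cigar_bit[0]
--
-- 		elif cigar_bit[1] == 'I':
-- 			"""add one to location, no change to scan count"""
-- 			change_to_bp += cigar_bit[0]
-- 		elif cigar_bit[1] == 'S' and (x != (len(cigar_dat) - 1)):
-- 			"""find the soft clipping strings, subtract from bp location"""
-- 			change_to_bp -= cigar_bit[0]
-- 			bp_scan += cigar_bit[0]
-- 		elif cigar_bit[1] == 'S':
-- 			bp_scan += cigar_bit[0]
--
-- 		""" if the scan has passed the snp, we can return the result,"""
-- 		"""	as no more changes will happen"""
-- 		if bp_scan >= bp_of_snp: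
-- 				return (bp_of_snp + change_to_bp)
-- ===== SOURCE B (Python) =====
-- def adjust_bp(bp_of_snp, cigar_dat):
-- 	""" map each cigar op to a (scan, change) delta, take prefix sums, find first threshold crossing"""
-- 	n = len(cigar_dat)
-- 	deltas = []
-- 	for i, (length, op) in enumerate(cigar_dat):
-- 		if op == 'M':
-- 			deltas.append((length, 0))
-- 		elif op == 'D':
-- 			deltas.append((length, -length))
-- 		elif op == 'I':
-- 			deltas.append((0, length))
-- 		elif op == 'S':
-- 			deltas.append((length, 0 if i == n - 1 else -length))
-- 		else:
-- 			deltas.append((0, 0))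
-- 	prefixes = []
-- 	scan = 0
-- 	change = 0
-- 	for s, c in deltas:
-- 		scan += s
-- 		change += c
-- 		prefixes.append((scan, change))
-- 	for scan, change in prefixes:
-- 		if scan >= bp_of_snp:
-- 			return bp_of_snp + change
-- 	return None
-- ===== Notes on version B (the rewrite author's own statement) =====
-- stated objective: alternative
-- what changed: Replaces A's single fused loop with mutable scan/change state by a three-phase pipeline: map each CIGAR op (with the trailing-S special case) to a (scan_delta, change_delta) pair, build the prefix sums, then find the first prefix whose scan reaches bp_of_snp.
import Mathlib
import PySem

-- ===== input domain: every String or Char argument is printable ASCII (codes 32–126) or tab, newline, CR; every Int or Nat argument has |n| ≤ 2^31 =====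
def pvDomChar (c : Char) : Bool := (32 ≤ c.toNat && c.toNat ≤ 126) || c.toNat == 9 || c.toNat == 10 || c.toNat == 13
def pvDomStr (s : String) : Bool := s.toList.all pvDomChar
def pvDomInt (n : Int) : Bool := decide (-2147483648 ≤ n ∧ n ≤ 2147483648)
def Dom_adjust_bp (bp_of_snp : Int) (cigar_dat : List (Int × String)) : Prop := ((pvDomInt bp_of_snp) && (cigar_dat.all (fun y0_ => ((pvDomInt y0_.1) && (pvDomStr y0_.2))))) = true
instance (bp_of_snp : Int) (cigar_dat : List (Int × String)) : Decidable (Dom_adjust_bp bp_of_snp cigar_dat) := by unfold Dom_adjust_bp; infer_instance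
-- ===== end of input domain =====

-- B replaces A's fused stateful scan by a three-phase pipeline (map ops to deltas, prefix-sum, find first crossing); objective: alternative decomposition, same cost.


-- ===== PORT A =====
-- loop over enumerate(cigar_dat) carrying (change_to_bp, bp_scan); n = len(cigar_dat)
def adjustA_go (bp_of_snp : Int) (n : Int) : List (Int × (Int × String)) → Int → Int → Option Int
  | [], _, _ => none
  | (x, bit) :: rest, change_to_bp, bp_scan =>
    let st : Int × Int :=
      if bit.2 = "M" then (change_to_bp, bp_scan + bit.1)
      else if bit.2 = "D" then (change_to_bp - bit.1, bp_scan + bit.1)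
      else if bit.2 = "I" then (change_to_bp + bit.1, bp_scan)
      else if bit.2 = "S" ∧ x ≠ n - 1 then (change_to_bp - bit.1, bp_scan + bit.1)
      else if bit.2 = "S" then (change_to_bp, bp_scan + bit.1)
      else (change_to_bp, bp_scan)
    if st.2 ≥ bp_of_snp then some (bp_of_snp + st.1)
    else adjustA_go bp_of_snp n rest st.1 st.2

def adjust_bp (bp_of_snp : Int) (cigar_dat : List (Int × String)) : Option Int :=
  adjustA_go bp_of_snp (cigar_dat.length : Int) (PySem.List.enumerate cigar_dat) 0 0

-- ===== PORT B =====
-- phase 1: map each (i, (length, op)) to a (scan_delta, change_delta) pair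
def deltaOf (n : Int) (i : Int) (p : Int × String) : Int × Int :=
  if p.2 = "M" then (p.1, 0)
  else if p.2 = "D" then (p.1, -p.1)
  else if p.2 = "I" then (0, p.1)
  else if p.2 = "S" then (p.1, if i = n - 1 then 0 else -p.1)
  else (0, 0)

-- phase 2: running prefix sums of the delta pairs
def prefixesOf : List (Int × Int) → Int → Int → List (Int × Int)
  | [], _, _ => []
  | (s, c) :: rest, scan, change => (scan + s, change + c) :: prefixesOf rest (scan + s) (change + c)

def adjust_bp_alt (bp_of_snp : Int) (cigar_dat : List (Int × String)) : Option Int :=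
  let n : Int := cigar_dat.length
  let deltas := (PySem.List.enumerate cigar_dat).map (fun ip => deltaOf n ip.1 ip.2)
  let prefixes := prefixesOf deltas 0 0
  (prefixes.find? (fun sc => sc.1 ≥ bp_of_snp)).map (fun sc => bp_of_snp + sc.2)

-- ===== PRECONDITION & SPEC =====
def Spec_adjust_bp (bp_of_snp : Int) (cigar_dat : List (Int × String)) (out : Option Int) : Prop := out = adjust_bp_alt bp_of_snp cigar_dat
instance (bp_of_snp : Int) (cigar_dat : List (Int × String)) (out : Option Int) : Decidable (Spec_adjust_bp bp_of_snp cigar_dat out) := by unfold Spec_adjust_bp; infer_instance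

-- ===== CLAIM (what is proved, stated in full; the proofs are below) =====
def Claim_equal_adjust_bp : Prop := ∀ (bp_of_snp : Int) (cigar_dat : List (Int × String)), Dom_adjust_bp bp_of_snp cigar_dat → Spec_adjust_bp bp_of_snp cigar_dat (adjust_bp bp_of_snp cigar_dat)

-- ===== LEMMAS AND PROOFS =====

-- one-step agreement: A's state update equals adding B's delta pair
lemma step_eq (n x : Int) (bit : Int × String) (change scan : Int) :
    (if bit.2 = "M" then (change, scan + bit.1)
      else if bit.2 = "D" then (change - bit.1, scan + bit.1)
      else if bit.2 = "I" then (change + bit.1, scan)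
      else if bit.2 = "S" ∧ x ≠ n - 1 then (change - bit.1, scan + bit.1)
      else if bit.2 = "S" then (change, scan + bit.1)
      else (change, scan))
    = (change + (deltaOf n x bit).2, scan + (deltaOf n x bit).1) := by
  unfold deltaOf
  by_cases hM : bit.2 = "M" <;> by_cases hD : bit.2 = "D" <;>
    by_cases hI : bit.2 = "I" <;> by_cases hS : bit.2 = "S" <;>
    by_cases hx : x = n - 1 <;>
    simp [hM, hD, hI, hS, hx] <;> ring_nf

-- the generalized loop invariant: A's loop from any state equals B's find over prefixes from that state
lemma go_eq (bp n : Int) (l : List (Int × (Int × String))) (change scan : Int) :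
    adjustA_go bp n l change scan
      = ((prefixesOf (l.map (fun ip => deltaOf n ip.1 ip.2)) scan change).find?
          (fun sc => sc.1 ≥ bp)).map (fun sc => bp + sc.2) := by
  induction l generalizing change scan with
  | nil => simp [adjustA_go, prefixesOf]
  | cons hd tl ih =>
    obtain ⟨x, bit⟩ := hd
    rw [adjustA_go]
    rw [step_eq n x bit change scan]
    simp only [List.map_cons, prefixesOf, List.find?_cons]
    by_cases h : scan + (deltaOf n x bit).1 ≥ bp
    · simp [h]
    · simp [h]
      exact ih _ _

-- ===== VERDICT (by name: the statement is the Claim_ definition above) =====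
theorem adjust_bp_spec : Claim_equal_adjust_bp := by
  intro bp cigar _
  unfold Spec_adjust_bp adjust_bp adjust_bp_alt
  exact go_eq bp _ _ 0 0
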